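-- pv_equiv track=rewrite | github.com/ImKhisam/codewars | Break the pieces/my_solution.py | print_pieces
-- ===== SOURCE A (Python) =====
-- def print_pieces(x):
--     res = ''
--     h = x[0]
--     l = x[1]
--     for x in range(h):
--         if x == 0:
--             res += ('+' + l * '-' + '+' + '\n')
--         elif x == h - 1:
--             res += ('+' + l * '-' + '+')
--         else:
--             res += ('|' + l * ' ' + '|' + '\n')
--     return res
-- ===== SOURCE B (Python) =====
-- def print_pieces(x):
--     h = x[0]
--     l = x[1]
--     if h <= 0:
--         return ''
--     border = '+' + '-' * l + '+'
--     if h == 1: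
--         return border + '\n'
--     side = '|' + ' ' * l + '|'
--     return border + '\n' + (side + '\n') * (h - 2) + border
-- ===== Notes on version B (the rewrite author's own statement) =====
-- stated objective: simpler
-- what changed: Replaces the row-by-row loop with index branching by a closed-form case split: precomputed border/side strings and string multiplication for the h-2 middle rows.
import Mathlib
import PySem

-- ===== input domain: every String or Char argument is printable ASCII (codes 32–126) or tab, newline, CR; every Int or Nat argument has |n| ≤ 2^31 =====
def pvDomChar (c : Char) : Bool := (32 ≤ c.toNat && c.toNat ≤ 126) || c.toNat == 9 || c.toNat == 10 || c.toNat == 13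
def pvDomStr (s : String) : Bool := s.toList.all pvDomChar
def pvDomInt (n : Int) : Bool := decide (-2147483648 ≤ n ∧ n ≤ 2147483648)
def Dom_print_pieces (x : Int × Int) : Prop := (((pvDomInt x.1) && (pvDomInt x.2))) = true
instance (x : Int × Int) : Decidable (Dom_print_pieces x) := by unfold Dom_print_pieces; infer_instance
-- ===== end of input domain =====

-- B replaces A's row-by-row loop with a closed-form case split (border / repeated side rows / border); objective: simpler.

-- ===== PORT A =====
-- the loop body of A: branch on the row index, append the corresponding row (strings as List Char, wrapped by String.mk at the end)
def pvBodyA (h l : Int) (res : List Char) (k : Int) : List Char :=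
  if k = 0 then res ++ ('+' :: (PySem.List.pyRepeat ['-'] l ++ ['+', '\n']))
  else if k = h - 1 then res ++ ('+' :: (PySem.List.pyRepeat ['-'] l ++ ['+']))
  else res ++ ('|' :: (PySem.List.pyRepeat [' '] l ++ ['|', '\n']))

def print_pieces (x : Int × Int) : String :=
  let h := x.1
  let l := x.2
  String.mk ((PySem.List.pyRange 0 h 1).foldl (pvBodyA h l) [])

-- ===== PORT B =====
def print_pieces_alt (x : Int × Int) : String :=
  let h := x.1
  let l := x.2
  if h ≤ 0 then ""
  else
    let border : List Char := '+' :: (PySem.List.pyRepeat ['-'] l ++ ['+'])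
    if h = 1 then String.mk (border ++ ['\n'])
    else
      let side : List Char := '|' :: (PySem.List.pyRepeat [' '] l ++ ['|'])
      String.mk (border ++ '\n' :: (PySem.List.pyRepeat (side ++ ['\n']) (h - 2) ++ border))

-- ===== PRECONDITION & SPEC =====
def Spec_print_pieces (x : Int × Int) (out : String) : Prop := out = print_pieces_alt x
instance (x : Int × Int) (out : String) : Decidable (Spec_print_pieces x out) := by unfold Spec_print_pieces; infer_instance

-- ===== CLAIM (what is proved, stated in full; the proofs are below) =====
def Claim_equal_print_pieces : Prop := ∀ (x : Int × Int), Dom_print_pieces x → Spec_print_pieces x (print_pieces x)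

-- ===== LEMMAS AND PROOFS =====

-- the middle rows of A's loop: every index strictly between 0 and h-1 takes the third branch,
-- so the fold over pyRange a (h-1) appends (h-1-a) copies of the side row
theorem pvMiddle (h l : Int) (n : Nat) : ∀ (a : Int) (acc : List Char), 0 < a → a + n = h - 1 →
    (PySem.List.pyRange a (h - 1) 1).foldl (pvBodyA h l) acc
      = acc ++ (List.replicate n ('|' :: (PySem.List.pyRepeat [' '] l ++ ['|', '\n']))).flatten := by
  induction n with
  | zero =>
    intro a acc ha hn
    rw [PySem.List.pyRange_one_eq_nil (by omega)]
    simp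
  | succ m ih =>
    intro a acc ha hn
    rw [PySem.List.pyRange_one_cons (by omega)]
    simp only [List.foldl_cons]
    rw [ih (a + 1) _ (by omega) (by omega)]
    have hb : pvBodyA h l acc a = acc ++ ('|' :: (PySem.List.pyRepeat [' '] l ++ ['|', '\n'])) := by
      unfold pvBodyA
      rw [if_neg (by omega), if_neg (by omega)]
    rw [hb]
    simp [List.replicate_succ]

theorem print_pieces_eq (x : Int × Int) : print_pieces x = print_pieces_alt x := by
  obtain ⟨h, l⟩ := x
  unfold print_pieces print_pieces_alt
  simp only
  by_cases h0 : h ≤ 0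
  · rw [PySem.List.pyRange_one_eq_nil (by omega), if_pos h0]
    rfl
  · by_cases h1 : h = 1
    · subst h1
      rw [if_neg h0, if_pos rfl]
      rw [show (PySem.List.pyRange 0 1 1) = [0] from PySem.List.pyRange_one_singleton 0]
      simp only [List.foldl_cons, List.foldl_nil, pvBodyA]
      simp
    · -- h ≥ 2
      rw [if_neg h0, if_neg h1]
      rw [PySem.List.pyRange_one_append 0 1 h (by omega) (by omega),
          PySem.List.pyRange_one_append 1 (h - 1) h (by omega) (by omega)]
      rw [show (PySem.List.pyRange 0 1 1) = [0] from PySem.List.pyRange_one_singleton 0,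
          show (PySem.List.pyRange (h - 1) h 1) = [h - 1] by
            have := PySem.List.pyRange_one_singleton (h - 1); rw [show h - 1 + 1 = h by ring] at this; exact this]
      simp only [List.foldl_append, List.foldl_cons, List.foldl_nil]
      have hb0 : pvBodyA h l [] 0 = '+' :: (PySem.List.pyRepeat ['-'] l ++ ['+', '\n']) := by
        unfold pvBodyA; rw [if_pos rfl]; simp
      rw [hb0, pvMiddle h l (h - 2).toNat 1 _ (by omega) (by omega)]
      have hbl : pvBodyA h l (('+' :: (PySem.List.pyRepeat ['-'] l ++ ['+', '\n'])) ++
            (List.replicate (h - 2).toNat ('|' :: (PySem.List.pyRepeat [' '] l ++ ['|', '\n']))).flatten) (h - 1)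
          = (('+' :: (PySem.List.pyRepeat ['-'] l ++ ['+', '\n'])) ++
            (List.replicate (h - 2).toNat ('|' :: (PySem.List.pyRepeat [' '] l ++ ['|', '\n']))).flatten)
            ++ ('+' :: (PySem.List.pyRepeat ['-'] l ++ ['+'])) := by
        unfold pvBodyA; rw [if_neg (by omega), if_pos rfl]
      rw [hbl]
      unfold PySem.List.pyRepeat
      simp

-- ===== VERDICT (by name: the statement is the Claim_ definition above) =====
theorem print_pieces_spec : Claim_equal_print_pieces := by
  intro x _
  exact print_pieces_eq x
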